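-- pv_equiv track=rewrite | github.com/totoLab/code-ingegneria-informatica | fondamenti1/simulazioni_esame/08022022/es3.py | filiali_ritardatarie
-- ===== SOURCE A (Python) =====
-- def filiali_ritardatarie(M):
--     filiali_ritardo = genera_filiali_ritardo(M)
--
--     massimo = -1
--     lista_ritardatarie = []
--     for filiale in filiali_ritardo:
--         ritardo = filiali_ritardo[filiale]
--         if ritardo > massimo:
--             massimo = ritardo
--             lista_ritardatarie = [filiale]
--         elif ritardo == massimo:
--             lista_ritardatarie.append(filiale)
--
--     return lista_ritardatarie
--
-- def calcola_ritardo(M, ordine):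
--     return M[ordine][1] - M[ordine][3]
--
-- def genera_filiali_ritardo(M):
--     filiali_ritardo = {}
--     for ordine in range(len(M)):
--         filiale = M[ordine][0]
--         if filiale not in filiali_ritardo:
--             filiali_ritardo[filiale] = 0
--         filiali_ritardo[filiale] += calcola_ritardo(M, ordine)
--
--     return filiali_ritardo
--
-- M = [
--     ["Filiale A", 10, 5, 8],
--     ["Filiale B", 12, 10, 12],
--     ["Filiale C", 6, 5, 4],
--     ["Filiale D", 4, 5, 4],
--     ["Filiale E", 8, 10, 7],
--     ["Filiale F", 6, 15, 5],
--     ["Filiale A", 10, 10, 9],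
--     ["Filiale B", 11, 5, 11],
--     ["Filiale C", 6, 5, 5],
--     ["Filiale D", 11, 10, 10],
-- ]
-- ===== SOURCE B (Python) =====
-- def filiali_ritardatarie(M):
--     filiali = []
--     for riga in M:
--         if riga[0] not in filiali:
--             filiali.append(riga[0])
--     totali = [sum(r[1] - r[3] for r in M if r[0] == f) for f in filiali]
--     m = -1
--     for t in totali:
--         if t > m:
--             m = t
--     return [f for f, t in zip(filiali, totali) if t == m]
-- ===== Notes on version B (the rewrite author's own statement) =====
-- stated objective: alternative
-- what changed: Drops the dict entirely: B collects the distinct branch names in first-occurrence order, computes each branch's total delay by a separate nested scan of M (sum over matching rows), takes the max of those totals seeded with -1, and zip-filters the parallel lists; A instead accumulates totals in one dict pass and tracks the running maximum and its list in a single combined scan.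
import Mathlib
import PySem

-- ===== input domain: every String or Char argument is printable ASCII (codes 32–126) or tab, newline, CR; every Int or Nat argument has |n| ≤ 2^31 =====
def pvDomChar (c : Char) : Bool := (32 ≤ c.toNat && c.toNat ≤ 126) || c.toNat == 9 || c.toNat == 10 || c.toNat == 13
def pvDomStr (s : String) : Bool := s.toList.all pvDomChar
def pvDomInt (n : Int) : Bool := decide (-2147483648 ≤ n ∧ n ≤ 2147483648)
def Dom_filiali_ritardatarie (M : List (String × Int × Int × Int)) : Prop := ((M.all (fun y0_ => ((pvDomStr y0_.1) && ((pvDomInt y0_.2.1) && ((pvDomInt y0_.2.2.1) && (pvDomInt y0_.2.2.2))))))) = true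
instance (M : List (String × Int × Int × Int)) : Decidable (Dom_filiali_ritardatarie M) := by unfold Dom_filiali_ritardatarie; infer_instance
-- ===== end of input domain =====

-- B drops the dict: distinct branch names in first-occurrence order, each branch's total
-- by a nested scan of M, then max-then-zip-filter (objective: alternative, not faster).

-- ===== PORT A =====
def calcola_ritardo (M : List (String × Int × Int × Int)) (ordine : Int) : Int :=
  (PySem.List.pyGetD M ordine ("", 0, 0, 0)).2.1 - (PySem.List.pyGetD M ordine ("", 0, 0, 0)).2.2.2

def genera_filiali_ritardo (M : List (String × Int × Int × Int)) : PySem.Dict String Int :=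
  (PySem.List.pyRange 0 (M.length : Int) 1).foldl
    (fun d ordine =>
      let filiale := (PySem.List.pyGetD M ordine ("", 0, 0, 0)).1
      let d' := if d.contains filiale then d else d.insert filiale 0
      d'.insert filiale (d'.getD filiale 0 + calcola_ritardo M ordine))
    PySem.Dict.empty

def filiali_ritardatarie (M : List (String × Int × Int × Int)) : List String :=
  let fr := genera_filiali_ritardo M
  (fr.keys.foldl
    (fun (st : Int × List String) filiale =>
      let ritardo := fr.getD filiale 0
      if ritardo > st.1 then (ritardo, [filiale])
      else if ritardo == st.1 then (st.1, st.2 ++ [filiale])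
      else st)
    (-1, [])).2

-- ===== PORT B =====
def filiali_ritardatarie_alt (M : List (String × Int × Int × Int)) : List String :=
  let filiali : PySem.Set String :=
    M.foldl (fun acc riga => PySem.Set.add acc riga.1) PySem.Set.empty
  let totali : List Int :=
    filiali.map (fun f => ((M.filter (fun r => r.1 == f)).map (fun r => r.2.1 - r.2.2.2)).sum)
  let m := totali.foldl (fun m t => if t > m then t else m) (-1 : Int)
  ((filiali.zip totali).filter (fun p => p.2 == m)).map Prod.fst

-- ===== PRECONDITION & SPEC =====
def Spec_filiali_ritardatarie (M : List (String × Int × Int × Int)) (out : List String) : Prop := out = filiali_ritardatarie_alt M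
instance (M : List (String × Int × Int × Int)) (out : List String) : Decidable (Spec_filiali_ritardatarie M out) := by unfold Spec_filiali_ritardatarie; infer_instance

-- ===== CLAIM (what is proved, stated in full; the proofs are below) =====
def Claim_equal_filiali_ritardatarie : Prop := ∀ (M : List (String × Int × Int × Int)), Dom_filiali_ritardatarie M → Spec_filiali_ritardatarie M (filiali_ritardatarie M)

-- ===== LEMMAS AND PROOFS =====

-- The two aggregation steps produce the same dict.
theorem step_eq (d : PySem.Dict String Int) (riga : String × Int × Int × Int) :
    (let d' := if d.contains riga.1 then d else d.insert riga.1 0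
     d'.insert riga.1 (d'.getD riga.1 0 + (riga.2.1 - riga.2.2.2)))
    = d.insert riga.1 (d.getD riga.1 0 + (riga.2.1 - riga.2.2.2)) := by
  by_cases h : d.contains riga.1 = true
  · simp [h]
  · show (if d.contains riga.1 = true then d else d.insert riga.1 0).insert riga.1 _ = _
    rw [if_neg h, PySem.Dict.insert_insert_self, PySem.Dict.getD_insert_self]
    simp [PySem.Dict.getD_of_not_contains, eq_false_of_ne_true h]

theorem build_fold_eq (M : List (String × Int × Int × Int)) (d : PySem.Dict String Int) :
    M.foldl
      (fun d riga =>
        let filiale := riga.1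
        let d' := if d.contains filiale then d else d.insert filiale 0
        d'.insert filiale (d'.getD filiale 0 + (riga.2.1 - riga.2.2.2))) d
    = M.foldl (fun d riga => d.insert riga.1 (d.getD riga.1 0 + (riga.2.1 - riga.2.2.2))) d := by
  induction M generalizing d with
  | nil => rfl
  | cons p t ih => simpa [List.foldl_cons, step_eq d p] using ih _

theorem genera_eq (M : List (String × Int × Int × Int)) :
    genera_filiali_ritardo M
    = M.foldl (fun d riga => d.insert riga.1 (d.getD riga.1 0 + (riga.2.1 - riga.2.2.2)))
        PySem.Dict.empty := by
  unfold genera_filiali_ritardo calcola_ritardo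
  rw [PySem.List.foldl_pyRange_zero_pyGetD' M ("", 0, 0, 0)
    (fun d riga =>
      let filiale := riga.1
      let d' := if d.contains filiale then d else d.insert filiale 0
      d'.insert filiale (d'.getD filiale 0 + (riga.2.1 - riga.2.2.2))) PySem.Dict.empty]
  exact build_fold_eq M PySem.Dict.empty

-- A's running-max loop over a list of (key, value) pairs, characterised.
theorem loopA_char (l : List (String × Int)) (m : Int) (acc : List String) :
    l.foldl
      (fun (st : Int × List String) p =>
        if p.2 > st.1 then (p.2, [p.1])
        else if p.2 == st.1 then (st.1, st.2 ++ [p.1])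
        else st)
      (m, acc)
    = ((l.map Prod.snd).foldl max m,
       (if (l.map Prod.snd).foldl max m = m then acc else [])
         ++ (l.filter (fun p => p.2 == (l.map Prod.snd).foldl max m)).map Prod.fst) := by
  induction l generalizing m acc with
  | nil => simp
  | cons p t ih =>
    have hle : ∀ (m0 : Int), m0 ≤ (t.map Prod.snd).foldl max m0 :=
      fun m0 => (PySem.List.le_foldl_max (t.map Prod.snd) m0).1
    simp only [List.foldl_cons, List.map_cons, List.filter_cons]
    rcases lt_trichotomy m p.2 with h1 | h2 | h3
    · have hmax : max m p.2 = p.2 := max_eq_right h1.le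
      rw [if_pos h1, ih]
      simp only [hmax]
      have hne : ¬ (t.map Prod.snd).foldl max p.2 = m := by
        have := hle p.2; omega
      rw [if_neg hne]
      by_cases h2 : p.2 = (t.map Prod.snd).foldl max p.2
      · simp [← h2]
      · have h2' : ¬ (t.map Prod.snd).foldl max p.2 = p.2 := fun hh => h2 hh.symm
        simp [h2, h2']
    · rw [if_neg (by omega), if_pos (by simp [h2.symm]), ih]
      simp only [← h2, max_self]
      by_cases h3 : (t.map Prod.snd).foldl max m = m
      · simp [h3]
      · have h3' : ¬ m = (t.map Prod.snd).foldl max m := fun hh => h3 hh.symm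
        simp [h3, h3']
    · rw [if_neg (by omega), if_neg (by simp; omega), ih]
      have hmax : max m p.2 = m := max_eq_left h3.le
      simp only [hmax]
      have : ¬ p.2 = (t.map Prod.snd).foldl max m := by
        have := hle m; omega
      simp [this]

theorem nodup_keys_build (M : List (String × Int × Int × Int)) :
    (M.foldl (fun d riga => d.insert riga.1 (d.getD riga.1 0 + (riga.2.1 - riga.2.2.2)))
      PySem.Dict.empty).keys.Nodup :=
  PySem.Dict.nodup_keys_foldl_insert_key M Prod.fst _ PySem.Dict.empty
    PySem.Dict.nodup_keys_empty

-- The dict's keys are exactly B's first-occurrence list of branch names.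
theorem keys_build_eq (M : List (String × Int × Int × Int)) :
    (M.foldl (fun d riga => d.insert riga.1 (d.getD riga.1 0 + (riga.2.1 - riga.2.2.2)))
      PySem.Dict.empty).keys
    = M.foldl (fun acc riga => PySem.Set.add acc riga.1) PySem.Set.empty := by
  rw [PySem.Dict.keys_foldl_insert_key M Prod.fst _ PySem.Dict.empty]
  show PySem.Set.update _ _ = _
  unfold PySem.Set.update
  rw [List.foldl_map]
  rfl

-- The dict's lookup is B's nested-scan sum of matching rows.
theorem getD_build (M : List (String × Int × Int × Int)) (d : PySem.Dict String Int) (f : String) :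
    (M.foldl (fun d riga => d.insert riga.1 (d.getD riga.1 0 + (riga.2.1 - riga.2.2.2))) d).getD f 0
    = d.getD f 0 + ((M.filter (fun r => r.1 == f)).map (fun r => r.2.1 - r.2.2.2)).sum := by
  induction M generalizing d with
  | nil => simp
  | cons r t ih =>
    simp only [List.foldl_cons, List.filter_cons]
    rw [ih]
    rw [PySem.Dict.getD_insert]
    by_cases h : f = r.1
    · subst h
      simp
      ring
    · have hb : (r.1 == f) = false := by simp [Ne.symm h]
      simp [h, hb]

-- l.zip (l.map g) enumerates l with g.
theorem zip_map_self {α β : Type} (l : List α) (g : α → β) :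
    l.zip (l.map g) = l.map (fun x => (x, g x)) := by
  induction l with
  | nil => rfl
  | cons x t ih => simp [List.zip_cons_cons, ih]

-- B's explicit max loop is the foldl of max.
theorem maxloop_eq (l : List Int) (m : Int) :
    l.foldl (fun m t => if t > m then t else m) m = l.foldl max m := by
  have : (fun (m t : Int) => if t > m then t else m) = max := by
    funext m t
    by_cases h : t > m
    · simp [h, max_eq_right h.le]
    · have h' : t ≤ m := by omega
      simp [h, max_eq_left h']
  rw [this]

-- The key-with-lookup fold A performs, rewritten to the items list.
theorem keys_foldl_to_items {β : Type} (d : PySem.Dict String Int) (hnd : d.keys.Nodup)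
    (g : β → String → Int → β) (init : β) :
    d.keys.foldl (fun st f => g st f (d.getD f 0)) init
    = d.items.foldl (fun st p => g st p.1 p.2) init := by
  rw [PySem.Dict.items_eq_map_keys d hnd 0, List.foldl_map]

-- ===== VERDICT (by name: the statement is the Claim_ definition above) =====
theorem filiali_ritardatarie_spec : Claim_equal_filiali_ritardatarie := by
  intro M _
  unfold Spec_filiali_ritardatarie filiali_ritardatarie filiali_ritardatarie_alt
  rw [genera_eq]
  set d := M.foldl (fun d riga => d.insert riga.1 (d.getD riga.1 0 + (riga.2.1 - riga.2.2.2)))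
    PySem.Dict.empty with hd
  have hnd : d.keys.Nodup := hd ▸ nodup_keys_build M
  simp only []
  rw [keys_foldl_to_items d hnd
    (fun (st : Int × List String) f r =>
      if r > st.1 then (r, [f]) else if r == st.1 then (st.1, st.2 ++ [f]) else st)
    ((-1 : Int), ([] : List String))]
  rw [loopA_char d.items (-1) []]
  -- rewrite B's data to the dict's items
  have hkeys : (M.foldl (fun acc riga => PySem.Set.add acc riga.1) PySem.Set.empty) = d.keys :=
    (hd ▸ keys_build_eq M).symm
  rw [hkeys]
  have hg : ∀ f : String,
      ((M.filter (fun r => r.1 == f)).map (fun r => r.2.1 - r.2.2.2)).sum = d.getD f 0 := by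
    intro f
    rw [hd, getD_build M PySem.Dict.empty f]
    simp
  have htot : d.keys.map
      (fun f => ((M.filter (fun r => r.1 == f)).map (fun r => r.2.1 - r.2.2.2)).sum)
      = d.items.map Prod.snd := by
    rw [PySem.Dict.items_eq_map_keys d hnd 0, List.map_map]
    exact List.map_congr_left (fun f _ => hg f)
  rw [htot, maxloop_eq]
  rw [show d.keys.zip (d.items.map Prod.snd)
        = d.items from by
    rw [PySem.Dict.items_eq_map_keys d hnd 0]
    simp only [List.map_map]
    rw [show (Prod.snd ∘ fun k : String => (k, d.getD k 0)) = fun k => d.getD k 0 from rfl]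
    rw [zip_map_self]]
  simp
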